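-- pv_equiv track=rewrite | github.com/chavezmg/codewars | Prostate cancer recurrence rates ASTRO.py | recurrence
-- ===== SOURCE A (Python) =====
-- def recurrence(values):
--     min_value_index = values.index(min(values))
--     rises, j = 0, min_value_index
--     for i in values[(min_value_index):]:
--         if rises>2:
--             return True
--         if(j<len(values)-1):
--             if values[j] < values[j+1]:
--                 rises += 1
--             else:
--                 rises = 0
--         j += 1
--     return False
-- ===== SOURCE B (Python) =====
-- from itertools import groupby
--
-- def recurrence(values):
--     m = values.index(min(values))
--     rises = [values[j] < values[j + 1] for j in range(m, len(values) - 1)]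
--     return any(flag and sum(1 for _ in grp) >= 3 for flag, grp in groupby(rises))
-- ===== Notes on version B (the rewrite author's own statement) =====
-- stated objective: alternative
-- what changed: Instead of A's single scan that carries a consecutive-rises counter with an early return, B first materializes the list of step-direction booleans after the minimum and then detects a run of >= 3 True via itertools.groupby over maximal runs.
-- outside the precondition, e.g. on recurrence([]): A raises ValueError, B raises ValueError
import Mathlib
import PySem

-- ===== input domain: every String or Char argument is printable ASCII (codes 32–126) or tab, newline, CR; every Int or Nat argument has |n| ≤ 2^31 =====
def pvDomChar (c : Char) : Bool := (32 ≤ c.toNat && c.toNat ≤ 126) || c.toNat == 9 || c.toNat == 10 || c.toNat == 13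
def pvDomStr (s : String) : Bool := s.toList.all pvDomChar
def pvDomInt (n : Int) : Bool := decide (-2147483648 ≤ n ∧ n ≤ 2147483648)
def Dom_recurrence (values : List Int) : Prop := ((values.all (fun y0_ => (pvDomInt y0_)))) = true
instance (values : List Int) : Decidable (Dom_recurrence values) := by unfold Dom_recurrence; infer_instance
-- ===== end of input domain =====

-- B replaces A's counter-carrying scan with early return by first materializing the list of
-- step-directions after the minimum and then checking group run lengths (groupby); objective:
-- alternative decomposition, same linear cost.

-- ===== PORT A =====
-- the for-loop of A: state (rises, j), iterating over the remaining slice values[min_index:]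
def loopA (values : List Int) (rest : List Int) (rises j : Int) : Bool :=
  match rest with
  | [] => false
  | _ :: tl =>
    if rises > 2 then true
    else
      let rises' :=
        if j < (values.length : Int) - 1 then
          (if PySem.List.pyGetD values j 0 < PySem.List.pyGetD values (j+1) 0 then rises + 1 else 0)
        else rises
      loopA values tl rises' (j + 1)

def recurrence (values : List Int) : Bool :=
  match PySem.List.min? values (fun x => x) with
  | none => false
  | some mv =>
    match PySem.List.index? values mv with
    | none => false
    | some m => loopA values (PySem.List.slice values (some (m : Int)) none) 0 (m : Int)

-- ===== PORT B =====
-- [values[j] < values[j+1] for j in range(m, len(values)-1)]; j, j+1 always in range here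
def riseTable (values : List Int) (m : Int) : List Bool :=
  (PySem.List.pyRange m ((values.length : Int) - 1) 1).map
    (fun j => decide (PySem.List.pyGetD values j 0 < PySem.List.pyGetD values (j+1) 0))

-- any(flag and sum(1 for _ in grp) >= 3 for flag, grp in groupby(bs))
def hasRun3 (bs : List Bool) : Bool :=
  match bs with
  | [] => false
  | b :: tl =>
    (b && decide (1 + (tl.takeWhile (· == b)).length ≥ 3)) || hasRun3 (tl.dropWhile (· == b))
termination_by bs.length
decreasing_by simp only [List.length_cons]; exact Nat.lt_succ_of_le (List.length_dropWhile_le _ _)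

def recurrence_alt (values : List Int) : Bool :=
  match PySem.List.min? values (fun x => x) with
  | none => false
  | some mv =>
    match PySem.List.index? values mv with
    | none => false
    | some m => hasRun3 (riseTable values (m : Int))

-- ===== PRECONDITION & SPEC =====
-- Pre_ excludes only the empty list, on which A's min([]) raises ValueError.
def Pre_recurrence (values : List Int) : Prop := values ≠ []
instance (values : List Int) : Decidable (Pre_recurrence values) := by unfold Pre_recurrence; infer_instance
def pvWitness_recurrence : List Int := ([1, 2, 3, 4])

def Spec_recurrence (values : List Int) (out : Bool) : Prop := out = recurrence_alt values
instance (values : List Int) (out : Bool) : Decidable (Spec_recurrence values out) := by unfold Spec_recurrence; infer_instance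

-- ===== CLAIM (what is proved, stated in full; the proofs are below) =====
def Claim_equal_recurrence : Prop := ∀ (values : List Int), Dom_recurrence values → Pre_recurrence values → Spec_recurrence values (recurrence values)

-- ===== LEMMAS AND PROOFS =====

-- abstract form of A's loop body: bs = remaining comparison outcomes, r = current rises counter
def hAbs (bs : List Bool) (r : Int) : Bool :=
  if r > 2 then true
  else match bs with
    | [] => false
    | b :: tl => hAbs tl (if b then r + 1 else 0)

-- the same rises-counting scan without the early return
def run3 (bs : List Bool) (r : Int) : Bool :=
  match bs with
  | [] => false
  | b :: tl =>
    let r' := if b then r + 1 else 0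
    (decide (r' > 2) || run3 tl r')

def run3tail (bs : List Bool) : Bool :=
  match bs with
  | [] => false
  | _ :: rest => run3 rest 0

lemma hAbs_eq_run3 (bs : List Bool) : ∀ r : Int, hAbs bs r = (decide (r > 2) || run3 bs r) := by
  induction bs with
  | nil => intro r; by_cases h : r > 2 <;> simp [hAbs, run3, h]
  | cons b tl ih =>
    intro r
    by_cases h : r > 2
    · simp [hAbs, h]
    · rw [show hAbs (b :: tl) r = (if r > 2 then true else hAbs tl (if b then r + 1 else 0)) from rfl]
      rw [if_neg h, ih]
      simp only [run3]
      simp [h]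

lemma run3_group (bs : List Bool) : ∀ r : Int, 0 ≤ r →
    run3 bs r = ((decide ((bs.takeWhile (· == true)).length ≥ 1 ∧ r + (bs.takeWhile (· == true)).length > 2))
      || run3tail (bs.dropWhile (· == true))) := by
  induction bs with
  | nil => intro r _; simp [run3, run3tail]
  | cons b tl ih =>
    intro r hr
    cases b with
    | false => simp [run3, run3tail]
    | true =>
      rw [show run3 (true :: tl) r = (decide (r + 1 > 2) || run3 tl (r + 1)) from rfl]
      rw [ih (r + 1) (by omega)]
      rw [Bool.eq_iff_iff]
      simp only [List.takeWhile_cons, List.dropWhile_cons, BEq.rfl, if_pos, List.length_cons,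
        Bool.or_eq_true, decide_eq_true_iff]
      constructor
      · rintro (h | (⟨h1, h2⟩ | h))
        · exact Or.inl ⟨by omega, by push_cast; omega⟩
        · exact Or.inl ⟨by omega, by push_cast at h2 ⊢; omega⟩
        · right; exact h
      · rintro (⟨h1, h2⟩ | h)
        · by_cases h3 : r + 1 > 2
          · left; omega
          · exact Or.inr (Or.inl ⟨by omega, by push_cast at h2 ⊢; omega⟩)
        · right; right; exact h

lemma run3_dropFalse (bs : List Bool) : run3 (bs.dropWhile (· == false)) 0 = run3 bs 0 := by
  induction bs with
  | nil => rfl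
  | cons b tl ih =>
    cases b with
    | false => simpa [run3] using ih
    | true => rfl

lemma run3_eq_hasRun3 : ∀ bs : List Bool, run3 bs 0 = hasRun3 bs
  | [] => by simp [run3, hasRun3]
  | false :: tl => by
    have h1 : run3 (false :: tl) 0 = run3 (tl.dropWhile (· == false)) 0 := by
      rw [show run3 (false :: tl) 0 = (decide ((0:Int) > 2) || run3 tl 0) from rfl]
      rw [run3_dropFalse]
      simp
    rw [h1, run3_eq_hasRun3 (tl.dropWhile (· == false)), hasRun3]
    simp
  | true :: tl => by
    rw [run3_group (true :: tl) 0 le_rfl, hasRun3]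
    congr 1
    · simp only [List.takeWhile_cons, BEq.rfl, if_pos, List.length_cons]
      rw [Bool.eq_iff_iff]
      simp only [decide_eq_true_iff, Bool.true_and]
      constructor
      · rintro ⟨_, h⟩; push_cast at h; omega
      · intro h; exact ⟨by omega, by push_cast; omega⟩
    · rw [show (true :: tl).dropWhile (· == true) = tl.dropWhile (· == true) from by simp]
      cases hd : tl.dropWhile (· == true) with
      | nil => simp [run3tail, hasRun3]
      | cons x rest =>
        have hx' : x = false := by
          have hne : tl.dropWhile (· == true) ≠ [] := by rw [hd]; simp
          have hx := List.head_dropWhile_not (· == true) hne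
          simp only [hd, List.head_cons] at hx
          cases x <;> simp_all
        subst hx'
        rw [show run3tail (false :: rest) = run3 rest 0 from rfl, hasRun3]
        simp only [Bool.false_and, Bool.false_or]
        rw [← run3_dropFalse rest]
        exact run3_eq_hasRun3 (rest.dropWhile (· == false))
termination_by bs => bs.length
decreasing_by
  · simp only [List.length_cons]; exact Nat.lt_succ_of_le (List.length_dropWhile_le _ _)
  · have h1 : rest.length < tl.length := by
      have := List.length_dropWhile_le (· == true) tl
      rw [hd] at this; simp at this; omega
    calc (rest.dropWhile (· == false)).length ≤ rest.length := List.length_dropWhile_le _ _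
      _ < (true :: tl).length := by simp; omega

lemma loopA_eq_hAbs (values : List Int) : ∀ (rest : List Int) (r j : Int),
    rest ≠ [] → j = (values.length : Int) - rest.length →
    loopA values rest r j = hAbs (riseTable values j) r := by
  intro rest
  induction rest with
  | nil => intro r j h _; exact absurd rfl h
  | cons x tl ih =>
    intro r j _ hj
    cases tl with
    | nil =>
      have hrange : PySem.List.pyRange j ((values.length : Int) - 1) 1 = [] :=
        PySem.List.pyRange_one_eq_nil (by simp at hj; omega)
      have hrt0 : riseTable values j = [] := by simp [riseTable, hrange]
      rw [show loopA values [x] r j = (if r > 2 then true else false) from rfl, hrt0,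
        show hAbs [] r = (if r > 2 then true else false) from rfl]
    | cons y tl' =>
      have hlt : j < (values.length : Int) - 1 := by simp at hj; omega
      have hrange : PySem.List.pyRange j ((values.length : Int) - 1) 1
          = j :: PySem.List.pyRange (j + 1) ((values.length : Int) - 1) 1 :=
        PySem.List.pyRange_one_cons (by omega)
      have hrt : riseTable values j
          = (decide (PySem.List.pyGetD values j 0 < PySem.List.pyGetD values (j+1) 0)) :: riseTable values (j + 1) := by
        simp only [riseTable, hrange, List.map_cons]
      rw [show loopA values (x :: y :: tl') r j
          = (if r > 2 then true else loopA values (y :: tl') (if j < (values.length : Int) - 1 then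
              (if PySem.List.pyGetD values j 0 < PySem.List.pyGetD values (j+1) 0 then r + 1 else 0)
            else r) (j + 1)) from rfl]
      rw [hrt]
      rw [show hAbs ((decide (PySem.List.pyGetD values j 0 < PySem.List.pyGetD values (j+1) 0)) :: riseTable values (j + 1)) r
          = (if r > 2 then true else hAbs (riseTable values (j + 1))
              (if decide (PySem.List.pyGetD values j 0 < PySem.List.pyGetD values (j+1) 0) then r + 1 else 0)) from rfl]
      by_cases h : r > 2
      · simp [h]
      · rw [if_neg h, if_neg h, if_pos hlt,
          ih _ (j + 1) (by simp) (by simp at hj ⊢; omega)]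
        by_cases hb : PySem.List.pyGetD values j 0 < PySem.List.pyGetD values (j+1) 0
        · simp [hb]
        · simp [hb]

-- ===== VERDICT (by name: the statement is the Claim_ definition above) =====
theorem recurrence_spec : Claim_equal_recurrence := by
  intro values _ _
  unfold Spec_recurrence recurrence recurrence_alt
  cases hmin : PySem.List.min? values (fun x => x) with
  | none => rfl
  | some mv =>
    cases hidx : PySem.List.index? values mv with
    | none => simp only [hidx]
    | some m =>
      simp only [hidx]
      obtain ⟨hm, _, _⟩ := PySem.List.getElem_of_index?_eq_some hidx
      have hslice : PySem.List.slice values (some (m : Int)) none = values.drop m :=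
        PySem.List.slice_from_natCast values m
      have hne : values.drop m ≠ [] := by
        simp [List.drop_eq_nil_iff]; omega
      have hlen : (m : Int) = (values.length : Int) - ((values.drop m).length : Int) := by
        simp [List.length_drop]; omega
      rw [hslice, loopA_eq_hAbs values (values.drop m) 0 (m : Int) hne hlen,
        hAbs_eq_run3, run3_eq_hasRun3]
      simp
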